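-- pv_equiv track=rewrite | github.com/comp110-24f/comp-110-workspace-TejasParam | exercises/ex06/dictionary.py | count
-- ===== SOURCE A (Python) =====
-- def count(input: list[str]) -> dict[str, int]:
--     """Count of each value in input dictionary"""
--     count: dict[str, int] = {}
--     # update key or add it if it doesnt exist
--     for i in input:
--         if i in count:
--             count[i] += 1
--         else:
--             count[i] = 1
--     return count
-- ===== SOURCE B (Python) =====
-- def count(input: list[str]) -> dict[str, int]:
--     """Count of each value in input dictionary"""
--     # one count() scan per distinct key, keys kept in first-appearance order
--     return {k: input.count(k) for k in dict.fromkeys(input)}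
-- ===== Notes on version B (the rewrite author's own statement) =====
-- stated objective: simpler
-- what changed: Replaces the incremental dict-update loop by a dict comprehension: deduplicate the keys once with dict.fromkeys (first-appearance order) and compute each key's value with a single list.count scan.
import Mathlib
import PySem

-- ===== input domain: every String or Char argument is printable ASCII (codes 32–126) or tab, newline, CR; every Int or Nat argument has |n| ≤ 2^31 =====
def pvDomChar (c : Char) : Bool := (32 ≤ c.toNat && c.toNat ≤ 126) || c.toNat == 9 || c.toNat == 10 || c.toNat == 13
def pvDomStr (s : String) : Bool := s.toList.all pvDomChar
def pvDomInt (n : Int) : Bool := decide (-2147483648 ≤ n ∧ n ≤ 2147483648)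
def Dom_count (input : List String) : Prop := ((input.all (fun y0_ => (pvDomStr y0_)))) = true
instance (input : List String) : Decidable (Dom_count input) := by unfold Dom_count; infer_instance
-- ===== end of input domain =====

-- B replaces A's incremental dict-update loop by a comprehension: dedup the keys once
-- (first-appearance order) and compute each value with one list.count scan — simpler, not faster.

-- ===== PORT A =====
-- for i in input: if i in count: count[i] += 1 else: count[i] = 1
def count (input : List String) : List (String × Int) :=
  (input.foldl
    (fun c i =>
      if c.contains i then c.insert i (c.getD i 0 + 1)
      else c.insert i 1)
    (PySem.Dict.mk ([] : List (String × Int)))).items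

-- ===== PORT B =====
-- {k: input.count(k) for k in dict.fromkeys(input)}
def count_alt (input : List String) : List (String × Int) :=
  (PySem.List.dedup input).map (fun k => (k, (PySem.List.count input k : Int)))

-- ===== PRECONDITION & SPEC =====
def Spec_count (input : List String) (out : List (String × Int)) : Prop := out = count_alt input
instance (input : List String) (out : List (String × Int)) : Decidable (Spec_count input out) := by unfold Spec_count; infer_instance

-- ===== CLAIM (what is proved, stated in full; the proofs are below) =====
def Claim_equal_count : Prop := ∀ (input : List String), Dom_count input → Spec_count input (count input)

-- ===== LEMMAS AND PROOFS =====

-- A's loop body, named for the lemmas below (definitionally the lambda in `count`)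
def pvStep (c : PySem.Dict String Int) (i : String) : PySem.Dict String Int :=
  if c.contains i then c.insert i (c.getD i 0 + 1) else c.insert i 1

lemma pvGetD_eq_zero_of_not_contains (c : PySem.Dict String Int) (k : String)
    (h : c.contains k = false) : c.getD k 0 = 0 := by
  simp only [PySem.Dict.contains, List.any_eq_false] at h
  simp only [PySem.Dict.getD, PySem.Dict.get?]
  rw [List.find?_eq_none.mpr h]
  rfl

-- one step keeps the key list in `Set.add` shape
lemma pvStep_keys (c : PySem.Dict String Int) (i : String) :
    (pvStep c i).items.map Prod.fst = PySem.Set.add (c.items.map Prod.fst) i := by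
  have hc : PySem.Set.contains (c.items.map Prod.fst) i = c.contains i := by
    simp only [PySem.Set.contains, PySem.Dict.contains]
    rw [Bool.eq_iff_iff]
    constructor
    · intro h1
      have hm : i ∈ c.items.map Prod.fst := by simpa using h1
      obtain ⟨p, hp, hpe⟩ := List.mem_map.mp hm
      exact List.any_eq_true.mpr ⟨p, hp, beq_iff_eq.mpr hpe⟩
    · intro h2
      obtain ⟨p, hp, hpe⟩ := List.any_eq_true.mp h2
      have hm : i ∈ c.items.map Prod.fst := List.mem_map.mpr ⟨p, hp, eq_of_beq hpe⟩
      simpa using hm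
  simp only [pvStep, PySem.Set.add, hc]
  by_cases h : c.contains i
  · simp only [h, if_true, PySem.Dict.insert, List.map_map]
    apply List.map_congr_left
    intro p hp
    by_cases hpk : p.1 == i
    · simp only [Function.comp, hpk, if_true]
      exact (eq_of_beq hpk).symm
    · simp [Function.comp, hpk]
  · have h0 : c.contains i = false := by simpa using h
    simp [PySem.Dict.insert, h0]

-- one step adds 1 to the stored count of i and changes no other value
lemma pvStep_getD (c : PySem.Dict String Int) (i v : String) :
    (pvStep c i).getD v 0 = c.getD v 0 + (if v = i then (1 : Int) else 0) := by
  unfold pvStep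
  by_cases h : c.contains i
  · simp only [h, if_true, PySem.Dict.getD_insert]
    by_cases hv : v = i
    · subst hv; simp
    · simp [hv]
  · simp only [Bool.not_eq_true] at h
    simp only [h, Bool.false_eq_true, if_false, PySem.Dict.getD_insert]
    by_cases hv : v = i
    · subst hv; simp [pvGetD_eq_zero_of_not_contains c v h]
    · simp [hv]

-- A's whole loop: key list in first-appearance order …
lemma pvFold_keys (l : List String) (d : PySem.Dict String Int) :
    (l.foldl pvStep d).items.map Prod.fst =
      List.foldl PySem.Set.add (d.items.map Prod.fst) l := by
  induction l generalizing d with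
  | nil => rfl
  | cons i t ih => rw [List.foldl_cons, List.foldl_cons, ih, pvStep_keys]

-- … and each stored value is the running count
lemma pvFold_getD (l : List String) (d : PySem.Dict String Int) (v : String) :
    (l.foldl pvStep d).getD v 0 = d.getD v 0 + (List.count v l : Int) := by
  induction l generalizing d with
  | nil => simp
  | cons i t ih =>
    rw [List.foldl_cons, ih, pvStep_getD, List.count_cons]
    by_cases hv : v = i
    · subst hv; simp; ring
    · have : ¬ (i == v) := fun hb => hv (eq_of_beq hb).symm
      simp [hv, this]

-- items of a dict with nodup keys are recovered by getD over their own keys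
lemma pvItems_eq_map (items : List (String × Int)) (h : (items.map Prod.fst).Nodup) :
    items.map (fun p => (p.1, (PySem.Dict.mk items).getD p.1 0)) = items := by
  induction items with
  | nil => rfl
  | cons q t ih =>
    rw [List.map_cons, List.nodup_cons] at h
    obtain ⟨h1, h2⟩ := h
    rw [List.map_cons]
    have hq : (PySem.Dict.mk (q :: t)).getD q.1 0 = q.2 := by
      simp [PySem.Dict.getD, PySem.Dict.get?, List.find?_cons_of_pos]
    have ht : t.map (fun p => (p.1, (PySem.Dict.mk (q :: t)).getD p.1 0)) =
              t.map (fun p => (p.1, (PySem.Dict.mk t).getD p.1 0)) := by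
      apply List.map_congr_left
      intro p hp
      have hne : ¬ (q.1 == p.1) := by
        intro hbeq
        exact h1 (eq_of_beq hbeq ▸ List.mem_map_of_mem hp)
      simp [PySem.Dict.getD, PySem.Dict.get?, List.find?_cons_of_neg, hne]
    rw [hq, ht, ih h2]

-- ===== VERDICT (by name: the statement is the Claim_ definition above) =====
theorem count_spec : Claim_equal_count := by
  intro input _
  show count input = count_alt input
  have hrw : count input = (input.foldl pvStep (PySem.Dict.mk [])).items := rfl
  rw [hrw]
  have hkeys := pvFold_keys input (PySem.Dict.mk [])
  have hnd : ((input.foldl pvStep (PySem.Dict.mk [])).items.map Prod.fst).Nodup := by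
    rw [hkeys]
    exact PySem.Set.nodup_ofList input
  calc (input.foldl pvStep (PySem.Dict.mk [])).items
      = (input.foldl pvStep (PySem.Dict.mk [])).items.map
          (fun p => (p.1, (input.foldl pvStep (PySem.Dict.mk [])).getD p.1 0)) :=
        (pvItems_eq_map _ hnd).symm
    _ = ((input.foldl pvStep (PySem.Dict.mk [])).items.map Prod.fst).map
          (fun k => (k, (input.foldl pvStep (PySem.Dict.mk [])).getD k 0)) := by
        rw [List.map_map]; rfl
    _ = (PySem.List.dedup input).map
          (fun k => (k, (input.foldl pvStep (PySem.Dict.mk [])).getD k 0)) := by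
        rw [hkeys]; rfl
    _ = count_alt input := by
        unfold count_alt
        apply List.map_congr_left
        intro k _
        rw [pvFold_getD]
        simp [PySem.Dict.getD, PySem.Dict.get?, PySem.List.count]
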